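-- pv_equiv track=rewrite | github.com/Izak76/GruProTraining-Solucoes | Tutorial Basico/Laços/Saldo de gols.py | max_pts
-- ===== SOURCE A (Python) =====
-- def rindex(itr, item):
-- 	return len(itr) - itr[::-1].index(item) - 1
--
-- def max_pts(D):
-- 	int_max = tuple()
-- 	pts_max = 0
-- 	for d in D:
-- 		dv = tuple(d.values())
-- 		pmx = max(dv)
-- 		if (pmx >= pts_max) and (pmx != 0):
-- 			dk = tuple(d.keys())[:rindex(dv, pmx)+1]
-- 			if (pmx > pts_max) or ((pmx == pts_max) and (len(dk) > len(int_max))):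
-- 				int_max = dk
-- 				pts_max = pmx
--
-- 	return int_max
-- ===== SOURCE B (Python) =====
-- def max_pts(D):
--     # Stage 1: per-dict maxima and the single global target score.
--     maxima = [max(d.values()) for d in D]
--     best = max(maxima, default=0)
--     if best <= 0:
--         return tuple()
--     # Stage 2: only dicts hitting the global target contribute; their prefix
--     # is obtained by popping trailing items until the target score is last.
--     prefixes = []
--     for d, m in zip(D, maxima):
--         if m == best:
--             items = list(d.items())
--             while items[-1][1] != best:
--                 items.pop()
--             prefixes.append(tuple(k for k, _ in items))
--     # Stage 3: the longest prefix wins; the earliest one on ties.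
--     return max(prefixes, key=len)
-- ===== Notes on version B (the rewrite author's own statement) =====
-- stated objective: alternative
-- what changed: A's single running-best loop (mutating pts_max/int_max under a lexicographic guard, prefix via a reversed-list rindex slice for every qualifying dict) is replaced by a three-stage pipeline: first compute the one global maximum score, then build prefixes only for the dicts that attain it by popping trailing items below the target, and finally pick the longest prefix (earliest on ties) with max(key=len) alone - no score comparison survives into the selection step.
import Mathlib
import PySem

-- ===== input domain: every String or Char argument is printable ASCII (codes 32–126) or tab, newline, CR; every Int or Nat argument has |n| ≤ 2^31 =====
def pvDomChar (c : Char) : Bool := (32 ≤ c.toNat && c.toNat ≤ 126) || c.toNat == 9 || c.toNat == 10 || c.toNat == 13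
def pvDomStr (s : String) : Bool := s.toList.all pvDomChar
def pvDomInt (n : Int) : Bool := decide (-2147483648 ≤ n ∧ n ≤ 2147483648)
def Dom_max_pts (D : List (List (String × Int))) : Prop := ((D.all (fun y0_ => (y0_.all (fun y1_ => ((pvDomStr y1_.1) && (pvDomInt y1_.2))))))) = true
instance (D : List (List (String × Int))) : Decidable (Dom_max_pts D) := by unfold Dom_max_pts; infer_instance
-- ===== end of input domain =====

-- B replaces A's running-best loop by a three-stage pipeline (global max score, trim-trailing prefixes of the attaining dicts, longest wins); objective: alternative decomposition (not faster).


-- ===== PORT A =====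
-- rindex(itr, item) = len(itr) - itr[::-1].index(item) - 1; itr[::-1] is List.reverse
-- (PySem.List.slice?_none_none_neg_one); .index -> index?, none = ValueError.
def pvRindex (itr : List Int) (item : Int) : Option Int :=
  (PySem.List.index? itr.reverse item).map (fun i : Nat => (itr.length : Int) - (i : Int) - 1)

-- one iteration of A's for-loop; state = (int_max, pts_max); 'none' branches are Python exceptions
def pvStepA (st : List String × Int) (d : List (String × Int)) : List String × Int :=
  let dv := (PySem.Dict.ofList d).values
  match PySem.List.max? dv (fun v => v) with
  | none => st          -- max(()) raises ValueError: outside Pre_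
  | some pmx =>
    if pmx ≥ st.2 ∧ pmx ≠ 0 then
      match pvRindex dv pmx with
      | none => st      -- unreachable: pmx ∈ dv
      | some r =>
        let dk := PySem.List.slice (PySem.Dict.ofList d).keys none (some (r + 1))
        if pmx > st.2 ∨ (pmx = st.2 ∧ dk.length > st.1.length) then (dk, pmx) else st
    else st

def max_pts (D : List (List (String × Int))) : List String :=
  (D.foldl pvStepA ([], 0)).1

-- ===== PORT B =====
-- max(d.values()); none = ValueError on an empty dict (outside Pre_)
def pvMaxOf (d : List (String × Int)) : Option Int :=
  PySem.List.max? (PySem.Dict.ofList d).values (fun v => v)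

-- Source B's 'while items[-1][1] != best: items.pop()' loop, run on the reversed item list
def pvTrimRev (b : Int) : List (String × Int) → List (String × Int)
  | [] => []
  | p :: t => if p.2 ≠ b then pvTrimRev b t else p :: t

def pvPrefixOf (d : List (String × Int)) (b : Int) : List String :=
  ((pvTrimRev b (PySem.Dict.ofList d).items.reverse).reverse).map Prod.fst

def max_pts_alt (D : List (List (String × Int))) : List String :=
  -- Stage 1: per-dict maxima, global target with default 0 (a none = ValueError dict is skipped; outside Pre_)
  let maxima := D.map pvMaxOf
  let best := ((PySem.List.max? (maxima.filterMap id) (fun v => v)).getD 0)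
  if best ≤ 0 then []
  else
    -- Stage 2: prefixes of the dicts attaining the target
    let prefixes := (D.zip maxima).foldl (fun acc p =>
      match p.2 with
      | some m => if m = best then acc ++ [pvPrefixOf p.1 best] else acc
      | none => acc) []
    -- Stage 3: longest prefix, earliest on ties ('none' unreachable: best > 0 is attained)
    match PySem.List.max? prefixes (fun p => (p.length : Int)) with
    | none => []
    | some w => w

-- ===== PRECONDITION & SPEC =====
-- Pre_ excludes inputs containing an empty dict: there max(d.values()) raises ValueError in A (and in B).
def Pre_max_pts (D : List (List (String × Int))) : Prop := ∀ d ∈ D, d ≠ []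
instance (D : List (List (String × Int))) : Decidable (Pre_max_pts D) := by unfold Pre_max_pts; infer_instance
def pvWitness_max_pts : (List (List (String × Int))) := [[("a", 2), ("b", 1)], [("c", 2)]]

def Spec_max_pts (D : List (List (String × Int))) (out : List String) : Prop := out = max_pts_alt D
instance (D : List (List (String × Int))) (out : List String) : Decidable (Spec_max_pts D out) := by unfold Spec_max_pts; infer_instance

-- ===== CLAIM (what is proved, stated in full; the proofs are below) =====
def Claim_equal_max_pts : Prop := ∀ (D : List (List (String × Int))), Dom_max_pts D → Pre_max_pts D → Spec_max_pts D (max_pts D)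

-- ===== LEMMAS AND PROOFS =====

-- the candidate of one dict: its max and its trimmed prefix, when the max is positive
def pvCand (d : List (String × Int)) : Option (Int × List String) :=
  match pvMaxOf d with
  | none => none
  | some m => if 0 < m then some (m, pvPrefixOf d m) else none

-- A's comparison of one candidate against the running best, as one option step
def pvMStep (acc : Option (Int × List String)) (c : Int × List String) : Option (Int × List String) :=
  match acc with
  | none => some c
  | some m => if m.1 < c.1 ∨ (¬ c.1 < m.1 ∧ (m.2.length : Int) < c.2.length) then some c else some m

-- the first-longest step (= PySem.List.max? with the length key)
def pvLenStep (acc : Option (List String)) (x : List String) : Option (List String) :=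
  match acc with
  | none => some x
  | some m => if ((m.length : Int) < (x.length : Int)) then some x else some m

def pvGA : Option (Int × List String) → List String × Int
  | none => ([], 0)
  | some c => (c.2, c.1)

-- trimming the reversed list = dropping everything after the last occurrence of b
theorem pv_trim_drop (lr : List (String × Int)) (b : Int) (h : b ∈ lr.map Prod.snd) :
    ∃ i : Nat, PySem.List.index? (lr.map Prod.snd) b = some i ∧ pvTrimRev b lr = lr.drop i := by
  induction lr with
  | nil => cases h
  | cons p t ih =>
    by_cases hp : p.2 = b
    · refine ⟨0, ?_, ?_⟩
      · simp only [List.map_cons, hp]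
        exact PySem.List.index?_cons_self _ _
      · simp [pvTrimRev, hp]
    · have hb : b ∈ t.map Prod.snd := by
        rcases List.mem_map.mp h with ⟨q, hq, hqb⟩
        rcases List.mem_cons.mp hq with rfl | hq'
        · exact absurd hqb hp
        · exact List.mem_map.mpr ⟨q, hq', hqb⟩
      obtain ⟨i, hi, ht⟩ := ih hb
      refine ⟨i + 1, ?_, ?_⟩
      · simp only [List.map_cons]
        rw [PySem.List.index?_cons_of_ne _ hp, hi]; rfl
      · simp [pvTrimRev, hp, ht]

-- A's rindex-slice prefix equals B's trim prefix
theorem pv_prefix_eq (d : List (String × Int)) (m : Int)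
    (h : m ∈ (PySem.Dict.ofList d).values) :
    ∃ r : Int, pvRindex ((PySem.Dict.ofList d).values) m = some r ∧ 0 ≤ r + 1 ∧
      PySem.List.slice ((PySem.Dict.ofList d).keys) none (some (r + 1)) = pvPrefixOf d m := by
  set l := (PySem.Dict.ofList d).items with hl
  have hv : (PySem.Dict.ofList d).values = l.map Prod.snd := rfl
  have hk : (PySem.Dict.ofList d).keys = l.map Prod.fst := rfl
  have hmem : m ∈ l.reverse.map Prod.snd := by
    rw [List.map_reverse, List.mem_reverse, ← hv]; exact h
  obtain ⟨i, hi, ht⟩ := pv_trim_drop l.reverse m hmem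
  have hlen : i < l.length := by
    rcases (PySem.List.index?_eq_some_iff _ _ _).mp hi with ⟨pre, suf, hsplit, hpre, _⟩
    have hs : (l.reverse.map Prod.snd).length = pre.length + suf.length + 1 := by
      rw [hsplit]; simp; omega
    simp only [List.length_map, List.length_reverse] at hs
    omega
  refine ⟨(l.length : Int) - i - 1, ?_, by omega, ?_⟩
  · simp only [pvRindex, hv, ← List.map_reverse, hi, Option.map_some]
    congr 1
    simp
  · have harith : ((l.length : Int) - i - 1 + 1) = ((l.length - i : Nat) : Int) := by
      omega
    rw [harith, hk, PySem.List.slice_to _ (by positivity)]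
    simp only [Int.toNat_natCast]
    rw [pvPrefixOf, ← hl, ht]
    rw [List.reverse_drop]
    simp [List.map_take]

-- one step of A = one candidate step, through pvGA (invariant: the best has positive points)
theorem pv_step_eq (o : Option (Int × List String)) (d : List (String × Int))
    (hinv : ∀ c, o = some c → 0 < c.1) :
    pvStepA (pvGA o) d = pvGA (match pvCand d with | none => o | some c => pvMStep o c) := by
  simp only [pvStepA, pvCand, pvMaxOf]
  cases hm : PySem.List.max? ((PySem.Dict.ofList d).values) (fun v => v) with
  | none => cases o <;> rfl
  | some m =>
    obtain ⟨r, hr, _, hs⟩ := pv_prefix_eq d m (PySem.List.max?_mem hm)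
    dsimp only
    rw [hr]
    simp only [hs]
    by_cases hm0 : 0 < m
    · rw [if_pos hm0]
      cases o with
      | none =>
        rw [if_pos (show m ≥ (pvGA none).2 ∧ m ≠ 0 from ⟨le_of_lt hm0, ne_of_gt hm0⟩)]
        simp [pvGA, pvMStep, hm0]
      | some p =>
        have hp := hinv p rfl
        simp only [pvGA, pvMStep]
        split_ifs with h1 h2 h3 <;>
          first
            | rfl
            | (simp only [ge_iff_le, gt_iff_lt, ne_eq, not_and, not_or, not_lt, Nat.cast_lt] at * ; omega)
    · rw [if_neg hm0]
      cases o with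
      | none => rw [if_neg (by simp only [pvGA]; omega)]
      | some p =>
        have hp := hinv p rfl
        rw [if_neg (by simp only [pvGA]; omega)]

theorem pv_step_inv (o : Option (Int × List String)) (d : List (String × Int))
    (hinv : ∀ c, o = some c → 0 < c.1) :
    ∀ c, (match pvCand d with | none => o | some c => pvMStep o c) = some c → 0 < c.1 := by
  intro c
  cases hc : pvCand d with
  | none => exact hinv c
  | some c0 =>
    have hc0 : 0 < c0.1 := by
      revert hc
      simp only [pvCand]
      cases pvMaxOf d with
      | none => intro h; cases h
      | some m =>
        dsimp only
        by_cases hm0 : 0 < m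
        · rw [if_pos hm0]; intro h; cases h; simpa using hm0
        · rw [if_neg hm0]; intro h; cases h
    intro h
    cases o with
    | none =>
      simp only [pvMStep] at h
      rw [Option.some.injEq] at h; subst h; exact hc0
    | some p =>
      simp only [pvMStep] at h
      split_ifs at h <;> rw [Option.some.injEq] at h <;> subst h
      · exact hc0
      · exact hinv p rfl

-- A's whole fold, through pvGA
theorem pv_main (D : List (List (String × Int))) (o : Option (Int × List String))
    (hinv : ∀ c, o = some c → 0 < c.1) :
    D.foldl pvStepA (pvGA o) =
      pvGA (D.foldl (fun o d => match pvCand d with | none => o | some c => pvMStep o c) o) := by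
  induction D generalizing o with
  | nil => rfl
  | cons d t ih =>
    simp only [List.foldl]
    rw [pv_step_eq o d hinv]
    exact ih _ (pv_step_inv o d hinv)

-- fold over D with candidate steps = fold over the candidate list
theorem pv_fold_filterMap (D : List (List (String × Int))) (o : Option (Int × List String)) :
    D.foldl (fun o d => match pvCand d with | none => o | some c => pvMStep o c) o
      = (D.filterMap pvCand).foldl pvMStep o := by
  induction D generalizing o with
  | nil => rfl
  | cons d t ih =>
    simp only [List.foldl, List.filterMap_cons]
    cases pvCand d with
    | none => exact ih o
    | some c => simp only [List.foldl]; exact ih _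

-- the structure theorem: the running-best fold = (max score, first longest prefix at that score)
theorem pv_reduce (cs : List (Int × List String)) (a : Int × List String) :
    cs.foldl pvMStep (some a) =
      ((( (a :: cs).filterMap (fun c => if c.1 = (cs.map Prod.fst).foldl max a.1 then some c.2 else none)
        ).foldl pvLenStep none).map (fun p => ((cs.map Prod.fst).foldl max a.1, p))) := by
  induction cs generalizing a with
  | nil => simp [pvLenStep]
  | cons c t ih =>
    simp only [List.foldl, List.map_cons]
    have hstep : pvMStep (some a) c =
        some (if a.1 < c.1 ∨ (¬ c.1 < a.1 ∧ (a.2.length : Int) < c.2.length) then c else a) := by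
      simp only [pvMStep]; split_ifs <;> rfl
    set a' := if a.1 < c.1 ∨ (¬ c.1 < a.1 ∧ (a.2.length : Int) < c.2.length) then c else a with ha'
    rw [hstep, ih a']
    have hfst : max a.1 c.1 = a'.1 := by
      rw [ha']; split_ifs with h
      · rcases h with h | ⟨h, _⟩
        · omega
        · omega
      · have h1 : ¬ a.1 < c.1 := fun hh => h (Or.inl hh)
        omega
    rw [← hfst]
    have hmax : max a.1 c.1 ≤ (t.map Prod.fst).foldl max (max a.1 c.1) :=
      (PySem.List.le_foldl_max _ _).1
    have haM : a.1 ≤ (t.map Prod.fst).foldl max (max a.1 c.1) := by omega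
    have hcM : c.1 ≤ (t.map Prod.fst).foldl max (max a.1 c.1) := by omega
    have ha'M : a'.1 ≤ (t.map Prod.fst).foldl max (max a.1 c.1) := by
      rw [ha']; split_ifs <;> omega
    congr 1
    -- show the two filtered lists fold to the same first-longest
    by_cases haeq : a.1 = (t.map Prod.fst).foldl max (max a.1 c.1) <;>
      by_cases hceq : c.1 = (t.map Prod.fst).foldl max (max a.1 c.1)
    · -- both attain the max: a' is the pairwise winner, and pvLenStep merges them the same way
      have ha'eq : a'.1 = (t.map Prod.fst).foldl max (max a.1 c.1) := by
        rw [ha']; split_ifs <;> assumption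
      have ha'2 : a'.2 = if (a.2.length : Int) < c.2.length then c.2 else a.2 := by
        rw [ha']
        have hca : ¬ c.1 < a.1 := by omega
        by_cases hl : (a.2.length : Int) < c.2.length
        · rw [if_pos (Or.inr ⟨hca, hl⟩), if_pos hl]
        · rw [if_neg (by rintro (h | ⟨-, h⟩) <;> omega), if_neg hl]
      simp only [List.filterMap_cons, if_pos haeq, if_pos hceq, if_pos ha'eq]
      simp only [List.foldl]
      congr 1
      rw [show pvLenStep none a.2 = some a.2 from rfl,
          show pvLenStep none a'.2 = some a'.2 from rfl, ha'2]
      simp only [pvLenStep]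
      split_ifs <;> rfl
    · have ha'a : a' = a := by
        rw [ha', if_neg (by rintro (h | ⟨h, -⟩) <;> omega)]
      simp only [List.filterMap_cons, if_pos haeq, if_neg hceq, ha'a]
      rfl
    · have ha'c : a' = c := by
        rw [ha', if_pos (Or.inl (by omega))]
      simp only [List.filterMap_cons, if_neg haeq, if_pos hceq, ha'c]
      rfl
    · have ha'ne : ¬ a'.1 = (t.map Prod.fst).foldl max (max a.1 c.1) := by
        rw [ha']; split_ifs <;> assumption
      simp only [List.filterMap_cons, if_neg haeq, if_neg hceq, if_neg ha'ne]
      rfl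

-- foldl max reaches exactly the greatest attained value
theorem pv_foldl_max_eq (l : List Int) (a b : Int) (hmem : b = a ∨ b ∈ l)
    (hub : a ≤ b) (hall : ∀ x ∈ l, x ≤ b) : l.foldl max a = b := by
  induction l generalizing a with
  | nil =>
    rcases hmem with rfl | h
    · rfl
    · cases h
  | cons x t ih =>
    simp only [List.foldl]
    have hx : x ≤ b := hall x (List.mem_cons_self)
    rcases hmem with rfl | h
    · exact ih _ (Or.inl (by omega)) (by omega) (fun y hy => hall y (List.mem_cons_of_mem _ hy))
    · rcases List.mem_cons.mp h with rfl | h'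
      · exact ih _ (Or.inl (by omega)) (by omega) (fun y hy => hall y (List.mem_cons_of_mem _ hy))
      · exact ih _ (Or.inr h') (by omega) (fun y hy => hall y (List.mem_cons_of_mem _ hy))

-- B's stage-2 loop builds exactly the filterMap of the per-dict contribution
theorem pv_prefixes_fold (D : List (List (String × Int))) (best : Int) (acc : List (List String)) :
    (D.zip (D.map pvMaxOf)).foldl (fun acc p =>
        match p.2 with
        | some m => if m = best then acc ++ [pvPrefixOf p.1 best] else acc
        | none => acc) acc
      = acc ++ D.filterMap (fun d =>
          match pvMaxOf d with
          | some m => if m = best then some (pvPrefixOf d best) else none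
          | none => none) := by
  induction D generalizing acc with
  | nil => simp
  | cons d t ih =>
    simp only [List.map_cons, List.zip_cons_cons, List.foldl, List.filterMap_cons]
    cases pvMaxOf d with
    | none => exact ih acc
    | some m =>
      dsimp only
      by_cases hm : m = best
      · rw [if_pos hm, if_pos hm, ih, List.append_assoc]; rfl
      · rw [if_neg hm, if_neg hm, ih]

-- folding the first-longest step from a some never reaches none
theorem pv_lenfold_some (l : List (List String)) (x : List String) :
    ∃ w, l.foldl pvLenStep (some x) = some w := by
  induction l generalizing x with
  | nil => exact ⟨x, rfl⟩
  | cons y t ih =>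
    simp only [List.foldl, pvLenStep]
    split_ifs <;> apply ih

-- every candidate's score is bounded by B's global target; the target itself is a candidate score
theorem pv_cand_fst_le (D : List (List (String × Int))) (best : Int)
    (hbest : ∀ m, (some m) ∈ D.map pvMaxOf → m ≤ best) :
    ∀ c ∈ D.filterMap pvCand, c.1 ≤ best := by
  intro c hc
  rcases List.mem_filterMap.mp hc with ⟨d, hd, hcd⟩
  revert hcd
  simp only [pvCand]
  cases hm : pvMaxOf d with
  | none => intro h; cases h
  | some m =>
    dsimp only
    split_ifs with h0
    · intro h; cases h
      exact hbest m (List.mem_map.mpr ⟨d, hd, hm⟩)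
    · intro h; cases h

-- ===== VERDICT (by name: the statement is the Claim_ definition above) =====
theorem max_pts_spec : Claim_equal_max_pts := by
  intro D _ _
  show max_pts D = max_pts_alt D
  simp only [max_pts, max_pts_alt]
  rw [show (([], 0) : List String × Int) = pvGA none from rfl,
      pv_main D none (by intro c h; cases h), pv_fold_filterMap]
  set best := ((PySem.List.max? ((D.map pvMaxOf).filterMap id) (fun v => v)).getD 0) with hbestdef
  have hub : ∀ m, (some m) ∈ D.map pvMaxOf → m ≤ best := by
    intro m hm
    have hmem : m ∈ (D.map pvMaxOf).filterMap id := List.mem_filterMap.mpr ⟨some m, hm, rfl⟩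
    cases hmx : PySem.List.max? ((D.map pvMaxOf).filterMap id) (fun v => v) with
    | none =>
      rw [PySem.List.max?_eq_none_iff] at hmx
      rw [hmx] at hmem; cases hmem
    | some M =>
      have := PySem.List.max?_isMax hmx m hmem
      rw [hbestdef, hmx]; simpa using this
  by_cases hpos : best ≤ 0
  · -- no positive score anywhere: no candidates, A's fold stays none, B returns []
    rw [if_pos hpos]
    have hnil : D.filterMap pvCand = [] := by
      rw [List.filterMap_eq_nil_iff]
      intro d hd
      simp only [pvCand]
      cases hm : pvMaxOf d with
      | none => rfl
      | some m =>
        dsimp only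
        rw [if_neg]
        have := hub m (List.mem_map.mpr ⟨d, hd, hm⟩)
        omega
    rw [hnil]; rfl
  · rw [if_neg hpos]
    rw [not_le] at hpos
    -- best is attained: the max? over the filterMap is some best
    have hatt : (some best) ∈ D.map pvMaxOf := by
      cases hmx : PySem.List.max? ((D.map pvMaxOf).filterMap id) (fun v => v) with
      | none =>
        exfalso
        rw [hbestdef, hmx] at hpos; simp at hpos
      | some M =>
        have hMb : M = best := by rw [hbestdef, hmx]; rfl
        have := PySem.List.max?_mem hmx
        rcases List.mem_filterMap.mp this with ⟨o, ho, hido⟩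
        cases o with
        | none => cases hido
        | some m => cases hido; rwa [← hMb]
    rcases List.mem_map.mp hatt with ⟨d0, hd0, hmd0⟩
    have hc0 : pvCand d0 = some (best, pvPrefixOf d0 best) := by
      simp only [pvCand, hmd0]
      rw [if_pos hpos]
    -- the candidate list is nonempty and its score-filter is B's prefixes list
    rw [pv_prefixes_fold, List.nil_append]
    have hfeq : (D.filterMap pvCand).filterMap
        (fun c => if c.1 = best then some c.2 else none)
      = D.filterMap (fun d =>
          match pvMaxOf d with
          | some m => if m = best then some (pvPrefixOf d best) else none
          | none => none) := by
      rw [List.filterMap_filterMap]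
      apply List.filterMap_congr
      intro d _
      simp only [pvCand]
      cases hm : pvMaxOf d with
      | none => rfl
      | some m =>
        dsimp only
        by_cases hmb : m = best
        · subst hmb
          rw [if_pos hpos]
          simp
        · split_ifs <;> simp [hmb]
    rw [← hfeq]
    -- now run the structure theorem on the nonempty candidate list
    cases hcs : D.filterMap pvCand with
    | nil =>
      exfalso
      have hbmem : (best, pvPrefixOf d0 best) ∈ D.filterMap pvCand :=
        List.mem_filterMap.mpr ⟨d0, hd0, hc0⟩
      rw [hcs] at hbmem; cases hbmem
    | cons c0 cs' =>
      have hall : ∀ c ∈ D.filterMap pvCand, c.1 ≤ best := pv_cand_fst_le D best hub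
      have hbmem : (best, pvPrefixOf d0 best) ∈ D.filterMap pvCand :=
        List.mem_filterMap.mpr ⟨d0, hd0, hc0⟩
      have hM : (cs'.map Prod.fst).foldl max c0.1 = best := by
        apply pv_foldl_max_eq
        · rw [hcs] at hbmem
          rcases List.mem_cons.mp hbmem with h | h
          · left; rw [← h]
          · right; exact List.mem_map.mpr ⟨_, h, rfl⟩
        · exact hall c0 (hcs ▸ List.mem_cons_self)
        · intro x hx
          rcases List.mem_map.mp hx with ⟨c, hc, rfl⟩
          exact hall c (hcs ▸ List.mem_cons_of_mem _ hc)
      simp only [List.foldl]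
      rw [show pvMStep none c0 = some c0 from rfl, pv_reduce cs' c0, hM]
      have hmax?fold : ∀ l : List (List String),
          PySem.List.max? l (fun p => (p.length : Int)) = l.foldl pvLenStep none := by
        intro l
        simp only [PySem.List.max?]
        congr 1
        funext acc x
        cases acc <;> rfl
      rw [hmax?fold]
      cases hfl : ((c0 :: cs').filterMap (fun c => if c.1 = best then some c.2 else none)).foldl pvLenStep none with
      | none =>
        exfalso
        -- the filtered list contains the attained best candidate, so the fold cannot be none
        have hne : ((c0 :: cs').filterMap (fun c => if c.1 = best then some c.2 else none)) ≠ [] := by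
          intro hnil
          rw [List.filterMap_eq_nil_iff] at hnil
          have := hnil _ (hcs ▸ hbmem)
          simp at this
        cases hl : (c0 :: cs').filterMap (fun c => if c.1 = best then some c.2 else none) with
        | nil => exact hne hl
        | cons y t =>
          rw [hl] at hfl
          simp only [List.foldl] at hfl
          obtain ⟨w, hw⟩ := pv_lenfold_some t y
          rw [show pvLenStep none y = some y from rfl, hw] at hfl
          cases hfl
      | some w => rfl
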